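-- pv_equiv track=rewrite | github.com/gobo7793/Geckarbot | coreplugins/update.py | consume_digits
-- ===== SOURCE A (Python) =====
-- import string
--
-- def consume_digits(s):
--     """
--     Splits arg in 3 parts. The first part is the longest substring beginning at the start that has digits, the second
--     part is everything that is not a letter, the third part is the rest. Everything is converted to lowercase. Examples:
--
--     "123abc" -> ("123", "", "abc")
--
--     "123-Abc4" -> ("123", "-", "abc4")
--
--     "-123" -> ("", "-", "123")
--
--     "abc4" -> ("", "", "abc4")
--
--     "123" -> ("123", "", "")
--
--     :param s: string to be split
--     :return: (digitsubstring, nonlettersubstring, rest)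
--     """
--     s = s.lower()
--     digits = None
--     nondigits = None
--     for i in range(len(s)):
--         if s[i] not in string.digits:
--             digits = s[:i]
--             nondigits = s[i:]
--             break
--
--     if digits is None:
--         digits = s[0:]
--         nondigits = s[:0]
--
--     nonletters = None
--     letters = None
--     for i in range(len(nondigits)):
--         if nondigits[i] in string.ascii_lowercase or nondigits[i] in string.digits:
--             nonletters = nondigits[:i]
--             letters = nondigits[i:]
--             break
--
--     if nonletters is None:
--         nonletters = nondigits[0:]
--         letters = nondigits[:0]
--     return digits, nonletters, letters
-- ===== SOURCE B (Python) =====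
-- def consume_digits(s):
--     # One pass over the lowered string with a 3-state machine:
--     # state 0 collects the digit prefix, state 1 the non-alphanumeric run, state 2 the rest.
--     parts = ([], [], [])
--     state = 0
--     for ch in s.lower():
--         if state == 0 and not ch.isdigit():
--             state = 1
--         if state == 1 and (ch.isdigit() or ch.islower()):
--             state = 2
--         parts[state].append(ch)
--     return "".join(parts[0]), "".join(parts[1]), "".join(parts[2])
-- ===== Notes on version B (the rewrite author's own statement) =====
-- stated objective: alternative
-- what changed: Replaces A's two index-scan-with-break loops plus slicing and None-fallbacks by a single pass over the lowered string with a 3-state machine that appends each character to one of the three output buckets.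
import Mathlib
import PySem

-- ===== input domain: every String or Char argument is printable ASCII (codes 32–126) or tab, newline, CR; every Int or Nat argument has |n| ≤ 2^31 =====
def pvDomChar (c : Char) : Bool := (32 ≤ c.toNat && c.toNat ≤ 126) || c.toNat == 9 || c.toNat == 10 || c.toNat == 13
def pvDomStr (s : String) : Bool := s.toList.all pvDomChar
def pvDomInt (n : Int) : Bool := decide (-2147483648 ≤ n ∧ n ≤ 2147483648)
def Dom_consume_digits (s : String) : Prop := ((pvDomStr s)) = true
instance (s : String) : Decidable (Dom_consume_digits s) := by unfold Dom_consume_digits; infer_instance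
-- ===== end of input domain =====

-- B replaces A's two scan-with-break loops by a single pass with a 3-state machine (alternative decomposition, same cost).

-- ===== PORT A =====
-- string.digits and string.ascii_lowercase
def pvDigits : List Char := ['0','1','2','3','4','5','6','7','8','9']
def pvLower : List Char :=
  ['a','b','c','d','e','f','g','h','i','j','k','l','m','n','o','p','q','r','s','t','u','v','w','x','y','z']

-- A's 'for i in range(len(s)): if p(s[i]): break' — first index whose char satisfies the break test
def pvFindBreak (p : Char → Bool) : List Char → Option Nat
  | [] => none
  | c :: rest => if p c then some 0 else (pvFindBreak p rest).map (· + 1)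

-- the (s[:i], s[i:]) split at the break index, with A's None-fallback (s[0:], s[:0])
def pvSplitAt (res : Option Nat) (cs : List Char) : List Char × List Char :=
  match res with
  | some i => (cs.take i, cs.drop i)
  | none => (cs, [])

def consume_digits (s : String) : String × String × String :=
  let cs := (PySem.Str.lower s).toList
  let dn := pvSplitAt (pvFindBreak (fun c => !(pvDigits.contains c)) cs) cs
  let nl := pvSplitAt (pvFindBreak (fun c => pvLower.contains c || pvDigits.contains c) dn.2) dn.2
  (String.ofList dn.1, String.ofList nl.1, String.ofList nl.2)

-- ===== PORT B =====
-- one step of B's loop body: state transitions, then append ch to the bucket for the current state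
def pvStepB (st : Nat × List Char × List Char × List Char) (ch : Char) :
    Nat × List Char × List Char × List Char :=
  let state := if st.1 == 0 && !PySem.Chars.isdigit ch then 1 else st.1
  let state := if state == 1 && (PySem.Chars.isdigit ch || PySem.Chars.islower ch) then 2 else state
  if state == 0 then (state, st.2.1 ++ [ch], st.2.2.1, st.2.2.2)
  else if state == 1 then (state, st.2.1, st.2.2.1 ++ [ch], st.2.2.2)
  else (state, st.2.1, st.2.2.1, st.2.2.2 ++ [ch])

def consume_digits_alt (s : String) : String × String × String :=
  let r := (PySem.Str.lower s).toList.foldl pvStepB (0, [], [], [])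
  (String.ofList r.2.1, String.ofList r.2.2.1, String.ofList r.2.2.2)

-- ===== PRECONDITION & SPEC =====
def Spec_consume_digits (s : String) (out : String × String × String) : Prop := out = consume_digits_alt s
instance (s : String) (out : String × String × String) : Decidable (Spec_consume_digits s out) := by unfold Spec_consume_digits; infer_instance

-- ===== CLAIM (what is proved, stated in full; the proofs are below) =====
def Claim_equal_consume_digits : Prop := ∀ (s : String), Dom_consume_digits s → Spec_consume_digits s (consume_digits s)

-- ===== LEMMAS AND PROOFS =====

lemma pv_contains_digits (c : Char) : (pvDigits.contains c) = PySem.Chars.isdigit c := by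
  rw [Bool.eq_iff_iff]
  simp [pvDigits, PySem.Chars.isdigit, Char.le_def, UInt32.le_iff_toNat_le, Char.ext_iff,
    UInt32.ext_iff]
  omega

lemma pv_contains_lower (c : Char) : (pvLower.contains c) = PySem.Chars.islower c := by
  rw [Bool.eq_iff_iff]
  simp [pvLower, PySem.Chars.islower, Char.le_def, UInt32.le_iff_toNat_le, Char.ext_iff,
    UInt32.ext_iff]
  omega

-- A's break loop + split is exactly takeWhile/dropWhile of the negated break test
lemma pvSplitAt_findBreak (p : Char → Bool) (cs : List Char) :
    pvSplitAt (pvFindBreak p cs) cs = (cs.takeWhile (fun c => !p c), cs.dropWhile (fun c => !p c)) := by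
  induction cs with
  | nil => rfl
  | cons c rest ih =>
    by_cases h : p c = true
    · simp [pvFindBreak, pvSplitAt, h]
    · rw [Bool.not_eq_true] at h
      cases hfb : pvFindBreak p rest with
      | none =>
        simp [pvFindBreak, pvSplitAt, h, hfb] at ih ⊢
        exact ih
      | some i =>
        simp [pvFindBreak, pvSplitAt, h, hfb] at ih ⊢
        exact ih

-- B's loop from state 2 dumps everything into the third bucket
lemma pv_fold2 (cs : List Char) (a b c : List Char) :
    cs.foldl pvStepB (2, a, b, c) = (2, a, b, c ++ cs) := by
  induction cs generalizing c with
  | nil => simp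
  | cons ch rest ih => simp [pvStepB, ih]

-- B's loop from state 1 fills bucket 2 while ¬(isdigit ∨ islower), then dumps the rest into bucket 3
lemma pv_fold1 (cs : List Char) (a b c : List Char) :
    (cs.foldl pvStepB (1, a, b, c)).2 =
      (a, b ++ cs.takeWhile (fun ch => !(PySem.Chars.isdigit ch || PySem.Chars.islower ch)),
       c ++ cs.dropWhile (fun ch => !(PySem.Chars.isdigit ch || PySem.Chars.islower ch))) := by
  induction cs generalizing b with
  | nil => simp
  | cons ch rest ih =>
    by_cases hd : PySem.Chars.isdigit ch = true
    · simp [pvStepB, hd, pv_fold2]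
    · rw [Bool.not_eq_true] at hd
      by_cases hl : PySem.Chars.islower ch = true
      · simp [pvStepB, hd, hl, pv_fold2]
      · rw [Bool.not_eq_true] at hl
        simp [pvStepB, hd, hl, ih]

-- B's loop from the start: digit prefix, then the state-1 phase
lemma pv_fold0 (cs : List Char) (a b c : List Char) :
    (cs.foldl pvStepB (0, a, b, c)).2 =
      (a ++ cs.takeWhile PySem.Chars.isdigit,
       b ++ ((cs.dropWhile PySem.Chars.isdigit).takeWhile
              (fun ch => !(PySem.Chars.isdigit ch || PySem.Chars.islower ch))),
       c ++ ((cs.dropWhile PySem.Chars.isdigit).dropWhile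
              (fun ch => !(PySem.Chars.isdigit ch || PySem.Chars.islower ch)))) := by
  induction cs generalizing a with
  | nil => simp
  | cons ch rest ih =>
    by_cases hd : PySem.Chars.isdigit ch = true
    · simp [pvStepB, hd, ih]
    · rw [Bool.not_eq_true] at hd
      by_cases hl : PySem.Chars.islower ch = true
      · simp [pvStepB, hd, hl, pv_fold2]
      · rw [Bool.not_eq_true] at hl
        simp [pvStepB, hd, hl, pv_fold1]

-- ===== VERDICT (by name: the statement is the Claim_ definition above) =====
theorem consume_digits_spec : Claim_equal_consume_digits := by
  intro s _
  show consume_digits s = consume_digits_alt s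
  unfold consume_digits consume_digits_alt
  have hcomm : (fun c => pvLower.contains c || pvDigits.contains c)
      = (fun ch => PySem.Chars.isdigit ch || PySem.Chars.islower ch) := by
    funext c; rw [pv_contains_lower, pv_contains_digits, Bool.or_comm]
  have hdig : (fun c => !(!(pvDigits.contains c))) = PySem.Chars.isdigit := by
    funext c; rw [Bool.not_not, pv_contains_digits]
  simp only [PySem.Str.toList_lower, pvSplitAt_findBreak, hcomm, pv_fold0, hdig]
  rfl
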